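-- pv_equiv track=rewrite | github.com/cherrypiejam/checkside | timing.py | parse_register
-- ===== SOURCE A (Python) =====
-- def parse_register(s: str) -> list[str]:
--     r64 = [ 'rax', 'rcx', 'rdx', 'rbx', 'rsp', 'rbp', 'rsi', 'rdi' ]
--     r32 = [ r.replace('r', 'e', 1) for r in r64 ]
--     r16 = [ r[1:] for r in r64 ]
--     r8  = [ r.replace('x', '', 1) + s for r in r16 for s in [ 'l', 'h' ][:r.count('x')+1] ]
--
--     s = s.lower()
--     #  if s == 'rsp':
--         #  return 'stack pointer'
--     r = ['r']
--     if s in r64: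
--         return ['r64', *r]
--     elif s in r32:
--         return ['r32', *r]
--     elif s in r16:
--         return ['r16', *r]
--     elif s in r8:
--         if len(s) == 2:
--             return ['r8' + s[-1], *r]
--         return ['r8', *r]
--     return []
-- ===== SOURCE B (Python) =====
-- def parse_register(s: str) -> list[str]:
--     table = {}
--     for r in ['rax', 'rcx', 'rdx', 'rbx', 'rsp', 'rbp', 'rsi', 'rdi']:
--         base = r[1:]
--         table[r] = ['r64', 'r']
--         table['e' + base] = ['r32', 'r']
--         table[base] = ['r16', 'r']
--         if base.endswith('x'):
--             table[base[0] + 'l'] = ['r8l', 'r']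
--             table[base[0] + 'h'] = ['r8h', 'r']
--         else:
--             table[base + 'l'] = ['r8', 'r']
--     return table.get(s.lower(), [])
-- ===== Notes on version B (the rewrite author's own statement) =====
-- stated objective: simpler
-- what changed: Replaces A's four derived register lists and the sequential membership/branch chain (with its length-2 r8l/r8h special-casing) by one precomputed name-to-result dictionary built in a single pass over the r64 names, so the body is a single table.get(s.lower(), []).
import Mathlib
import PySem

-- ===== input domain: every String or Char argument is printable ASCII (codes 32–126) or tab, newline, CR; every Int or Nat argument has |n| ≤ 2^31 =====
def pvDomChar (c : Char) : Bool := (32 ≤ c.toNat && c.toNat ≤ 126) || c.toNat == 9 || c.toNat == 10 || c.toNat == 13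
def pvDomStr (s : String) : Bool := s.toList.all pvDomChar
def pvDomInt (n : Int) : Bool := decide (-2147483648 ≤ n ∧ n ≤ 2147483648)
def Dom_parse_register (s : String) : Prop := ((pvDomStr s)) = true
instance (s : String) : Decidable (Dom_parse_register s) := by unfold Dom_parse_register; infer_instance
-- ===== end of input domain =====

-- B replaces A's four derived lists and the sequential membership/branch chain by one
-- precomputed name→result table and a single dictionary lookup (objective: simpler).

-- ===== PORT A =====
-- str.replace(old, new, 1): replace the first occurrence only (PySem has no count
-- parameter, so this is a hand port; exact for Python's semantics incl. empty old).
def pvRepl1 (old new : List Char) : List Char → List Char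
  | [] => if old = [] then new else []
  | c :: t =>
      if old.isPrefixOf (c :: t) then new ++ (c :: t).drop old.length
      else c :: pvRepl1 old new t

def pvReplace1 (s old new : String) : String :=
  String.ofList (pvRepl1 old.toList new.toList s.toList)

def pvR64 : List String := ["rax", "rcx", "rdx", "rbx", "rsp", "rbp", "rsi", "rdi"]
def pvR32 : List String := pvR64.map (fun r => pvReplace1 r "r" "e")
def pvR16 : List String := pvR64.map (fun r => PySem.Str.slice r (some 1) none)
def pvR8 : List String :=
  pvR16.flatMap (fun r =>
    (PySem.List.slice ["l", "h"] none (some ((PySem.Str.count r "x" : Int) + 1))).map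
      (fun suf => pvReplace1 r "x" "" ++ suf))

-- A's body after the list setup; A lowercases s and then runs the branch chain.
def pvAcore (t : String) : List String :=
  let r : List String := ["r"]
  if t ∈ pvR64 then "r64" :: r
  else if t ∈ pvR32 then "r32" :: r
  else if t ∈ pvR16 then "r16" :: r
  else if t ∈ pvR8 then
    if PySem.Str.len t = 2 then
      match PySem.Str.pyGet? t (-1) with   -- s[-1]; some: len t = 2 here
      | some c => ("r8" ++ String.ofList [c]) :: r
      | none => []
    else "r8" :: r
  else []

def parse_register (s : String) : List String :=
  pvAcore (PySem.Str.lower s)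

-- ===== PORT B =====
def pvTable : PySem.Dict String (List String) :=
  (["rax", "rcx", "rdx", "rbx", "rsp", "rbp", "rsi", "rdi"] : List String).foldl
    (fun d r =>
      let base := PySem.Str.slice r (some 1) none
      let d := d.insert r ["r64", "r"]
      let d := d.insert ("e" ++ base) ["r32", "r"]
      let d := d.insert base ["r16", "r"]
      if PySem.Str.endswith base "x" then
        match PySem.Str.pyGet? base 0 with   -- base[0]; some: base is nonempty
        | some c =>
            (d.insert (String.ofList [c] ++ "l") ["r8l", "r"]).insert
              (String.ofList [c] ++ "h") ["r8h", "r"]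
        | none => d
      else d.insert (base ++ "l") ["r8", "r"])
    PySem.Dict.empty

def parse_register_alt (s : String) : List String :=
  pvTable.getD (PySem.Str.lower s) []

-- ===== PRECONDITION & SPEC =====
def Spec_parse_register (s : String) (out : List String) : Prop := out = parse_register_alt s
instance (s : String) (out : List String) : Decidable (Spec_parse_register s out) := by unfold Spec_parse_register; infer_instance

-- ===== CLAIM (what is proved, stated in full; the proofs are below) =====
def Claim_equal_parse_register : Prop := ∀ (s : String), Dom_parse_register s → Spec_parse_register s (parse_register s)

-- ===== LEMMAS AND PROOFS =====
-- All 36 register names (the keys of pvTable, and the union of A's four lists).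
def pvKeys : List String :=
  ["rax", "eax", "ax", "al", "ah", "rcx", "ecx", "cx", "cl", "ch",
   "rdx", "edx", "dx", "dl", "dh", "rbx", "ebx", "bx", "bl", "bh",
   "rsp", "esp", "sp", "spl", "rbp", "ebp", "bp", "bpl",
   "rsi", "esi", "si", "sil", "rdi", "edi", "di", "dil"]

set_option maxRecDepth 40000 in
lemma pvKeys_table : pvTable.keys = pvKeys := by decide

set_option maxRecDepth 40000 in
lemma pv_core (t : String) : pvAcore t = pvTable.getD t [] := by
  by_cases h : t ∈ pvKeys
  · fin_cases h <;> decide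
  · have h64 : t ∉ pvR64 := fun hm => h ((by decide : ∀ x ∈ pvR64, x ∈ pvKeys) t hm)
    have h32 : t ∉ pvR32 := fun hm => h ((by decide : ∀ x ∈ pvR32, x ∈ pvKeys) t hm)
    have h16 : t ∉ pvR16 := fun hm => h ((by decide : ∀ x ∈ pvR16, x ∈ pvKeys) t hm)
    have h8 : t ∉ pvR8 := fun hm => h ((by decide : ∀ x ∈ pvR8, x ∈ pvKeys) t hm)
    have hc : ¬ pvTable.contains t = true := by
      rw [PySem.Dict.contains_iff_mem_keys, pvKeys_table]; exact h
    have hg : pvTable.getD t [] = [] :=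
      PySem.Dict.getD_of_not_contains _ _ (by revert hc; cases pvTable.contains t <;> simp)
    simp [pvAcore, h64, h32, h16, h8, hg]

-- ===== VERDICT (by name: the statement is the Claim_ definition above) =====
theorem parse_register_spec : Claim_equal_parse_register := by
  intro s _
  unfold Spec_parse_register parse_register parse_register_alt
  exact pv_core _
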